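-- pv_equiv track=rewrite | github.com/alexandraback/datacollection | solutions_5631989306621952_1/Python/Aerodonkey/a.py | solve
-- ===== SOURCE A (Python) =====
-- def solve(S):
--     W = ['']
--     for i in range(len(S)):
--         y = None
--         for j, c in enumerate(S[:i + 1]):
--             w = c + W[j] + S[j + 1:i + 1]
--             if y is None or w > y:
--                 y = w
--         W.append(y)
--     return W[-1]
-- ===== SOURCE B (Python) =====
-- def solve(S):
--     front = []  # prepended characters, in insertion order (string front is front[-1])
--     back = []   # appended characters, in order
--     for c in S:
--         if front and c < front[-1]:
--             back.append(c)
--         else: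
--             front.append(c)
--     return ''.join(reversed(front)) + ''.join(back)
-- ===== Notes on version B (the rewrite author's own statement) =====
-- stated objective: faster
-- what changed: Replaces A's O(n^3) prefix DP (for each prefix, scan all split points j building and lex-comparing candidate strings S[j]+W[j]+S[j+1:i+1]) by a one-pass greedy that prepends each character unless it is smaller than the current first character, in which case it appends; front/back kept as two lists so each step is O(1).
import Mathlib
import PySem

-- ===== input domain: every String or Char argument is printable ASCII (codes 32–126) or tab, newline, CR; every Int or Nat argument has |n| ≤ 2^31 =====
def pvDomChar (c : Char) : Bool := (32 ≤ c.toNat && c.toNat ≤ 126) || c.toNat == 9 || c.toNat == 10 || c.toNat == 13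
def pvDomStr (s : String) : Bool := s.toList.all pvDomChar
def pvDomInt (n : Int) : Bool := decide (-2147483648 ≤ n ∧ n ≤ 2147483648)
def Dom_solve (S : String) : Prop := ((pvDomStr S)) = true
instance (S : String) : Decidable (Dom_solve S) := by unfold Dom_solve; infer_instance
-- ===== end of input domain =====

-- B replaces A's cubic prefix DP by a linear greedy front/back insertion; same return value on every input.

-- ===== PORT A =====
-- Python's '<' on strings, on List Char (lexicographic by code point); 'w > y' is 'pyLtChars y w'.
def pyLtChars : List Char → List Char → Bool
  | _, [] => false
  | [], _ :: _ => true
  | a :: x, b :: y => if a < b then true else if b < a then false else pyLtChars x y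

-- literal port of A: W = ['']; for i in range(len(S)): inner max over j of S[j]+W[j]+S[j+1:i+1]; return W[-1]
-- (strings are handled as List Char; len(S) = len(S.toList), string slices/concat = list slices/concat, exact)
def solve (S : String) : String :=
  let L := S.toList
  let W := (PySem.List.pyRange 0 (PySem.List.len L)).foldl (fun W i =>
    let y := (PySem.List.enumerate (PySem.List.slice L none (some (i + 1)))).foldl
      (fun y jc =>
        let w := jc.2 :: (PySem.List.pyGetD W jc.1 [] ++ PySem.List.slice L (some (jc.1 + 1)) (some (i + 1)))
        match y with
        | none => some w
        | some yv => if pyLtChars yv w then some w else some yv) none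
    W ++ [y.getD []]) [([] : List Char)]
  String.mk (PySem.List.pyGetD W (-1) [])

-- ===== PORT B =====
-- literal port of Source B: front/back lists; prepend (append to 'front') unless c < front[-1], else append to 'back';
-- result = reversed(front) + back  (front[-1] read via getLast?, defined exactly when 'front' is truthy)
def solve_alt (S : String) : String :=
  let fb := S.toList.foldl (fun fb c =>
    match fb.1.getLast? with
    | some h => if c < h then (fb.1, fb.2 ++ [c]) else (fb.1 ++ [c], fb.2)
    | none => (fb.1 ++ [c], fb.2)) (([] : List Char), ([] : List Char))
  String.mk (fb.1.reverse ++ fb.2)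

-- ===== PRECONDITION & SPEC =====
def Spec_solve (S : String) (out : String) : Prop := out = solve_alt S
instance (S : String) (out : String) : Decidable (Spec_solve S out) := by unfold Spec_solve; infer_instance

-- ===== CLAIM (what is proved, stated in full; the proofs are below) =====
def Claim_equal_solve : Prop := ∀ (S : String), Dom_solve S → Spec_solve S (solve S)

-- ===== LEMMAS AND PROOFS =====

-- the common greedy model: prepend c unless c is smaller than the current first character
def gstep (G : List Char) (c : Char) : List Char :=
  match G with
  | [] => [c]
  | h :: _ => if c < h then G ++ [c] else c :: G

def g (L : List Char) : List Char := L.foldl gstep []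

-- named copies of A's two loop bodies (definitionally equal to the port's lambdas)
def ostep (y : Option (List Char)) (w : List Char) : Option (List Char) :=
  match y with
  | none => some w
  | some yv => if pyLtChars yv w then some w else some yv

def mstep (y w : List Char) : List Char := if pyLtChars y w then w else y

def candF (L : List Char) (W : List (List Char)) (i : Int) (jc : Int × Char) : List Char :=
  jc.2 :: (PySem.List.pyGetD W jc.1 [] ++ PySem.List.slice L (some (jc.1 + 1)) (some (i + 1)))

def outerStep (L : List Char) (W : List (List Char)) (i : Int) : List (List Char) :=
  W ++ [((PySem.List.enumerate (PySem.List.slice L none (some (i + 1)))).foldl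
      (fun y jc => ostep y (candF L W i jc)) none).getD []]

-- candidate j at outer step i, with W[j] = greedy of the length-j prefix
def cand (L : List Char) (i j : Nat) : List Char :=
  L.getD j ' ' :: (g (L.take j) ++ (L.drop (j + 1)).take (i - j))

lemma length_gstep (G : List Char) (c : Char) : (gstep G c).length = G.length + 1 := by
  cases G with
  | nil => rfl
  | cons h t => simp only [gstep]; split <;> simp

lemma length_foldl_gstep (L G : List Char) :
    (L.foldl gstep G).length = G.length + L.length := by
  induction L generalizing G with
  | nil => simp
  | cons c L ih => simp [List.foldl_cons, ih, length_gstep]; omega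

lemma length_g (L : List Char) : (g L).length = L.length := by
  simp [g, length_foldl_gstep]

-- head of the greedy string bounds every character in it
def HeadUB (G : List Char) : Prop := ∀ h, G.head? = some h → ∀ a ∈ G, a ≤ h

lemma headUB_gstep (G : List Char) (c : Char) (hG : HeadUB G) : HeadUB (gstep G c) := by
  cases G with
  | nil =>
    intro h hh a ha
    have hg : gstep [] c = [c] := rfl
    rw [hg] at hh ha
    simp at hh ha
    exact le_of_eq (ha.trans hh)
  | cons x t =>
    by_cases hc : c < x
    · have hg : gstep (x :: t) c = (x :: t) ++ [c] := by simp [gstep, hc]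
      intro h hh a ha
      rw [hg] at hh ha
      have hhx : x = h := by simpa using hh
      rw [← hhx]
      rcases (by simpa using ha : a = x ∨ a ∈ t ∨ a = c) with ha' | ha' | ha'
      · exact le_of_eq ha'
      · exact hG x rfl a (by simp [ha'])
      · rw [ha']; exact le_of_lt hc
    · have hg : gstep (x :: t) c = c :: x :: t := by simp [gstep, hc]
      intro h hh a ha
      rw [hg] at hh ha
      have hhc : c = h := by simpa using hh
      rw [← hhc]
      rcases (by simpa using ha : a = c ∨ a ∈ x :: t) with ha' | ha'
      · rw [ha']
      · exact le_trans (hG x rfl a ha') (not_lt.mp hc)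

lemma headUB_g (L : List Char) : HeadUB (g L) := by
  suffices h : ∀ G, HeadUB G → HeadUB (L.foldl gstep G) by
    exact h [] (by intro h hh a ha; simp at hh)
  induction L with
  | nil => intro G hG; simpa
  | cons c L ih => intro G hG; exact ih _ (headUB_gstep G c hG)

-- lexicographic facts about pyLtChars
lemma pyLt_append_same (a b : List Char) (x : Char) (h : a.length = b.length) :
    pyLtChars (a ++ [x]) (b ++ [x]) = pyLtChars a b := by
  induction a generalizing b with
  | nil => cases b with
    | nil => simp [pyLtChars]
    | cons y ys => simp at h
  | cons c cs ih =>
    cases b with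
    | nil => simp at h
    | cons y ys =>
      simp only [List.cons_append, pyLtChars]
      simp at h
      rw [ih ys h]

lemma pyLt_asymm_eq (a b : List Char) (h : a.length = b.length)
    (hab : pyLtChars a b = false) (hba : pyLtChars b a = false) : a = b := by
  induction a generalizing b with
  | nil => cases b with
    | nil => rfl
    | cons y ys => simp at h
  | cons c cs ih =>
    cases b with
    | nil => simp at h
    | cons y ys =>
      simp only [pyLtChars] at hab hba
      simp at h
      by_cases h1 : c < y
      · simp [h1] at hab
      · by_cases h2 : y < c
        · simp [h2] at hba
        · have hcy : c = y := le_antisymm (not_lt.mp h2) (not_lt.mp h1)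
          simp [hcy] at hab hba ⊢
          exact ih ys h hab hba

-- if c bounds every char of l, then c::l is not lexicographically below l++[c]
lemma pyLt_rotate_false (l : List Char) (c : Char) (hub : ∀ a ∈ l, a ≤ c) :
    pyLtChars (c :: l) (l ++ [c]) = false := by
  induction l with
  | nil => simp [pyLtChars]
  | cons a t ih =>
    have hac : a ≤ c := hub a (by simp)
    simp only [List.cons_append, pyLtChars]
    by_cases h1 : c < a
    · exact absurd hac (not_le.mpr h1)
    · by_cases h2 : a < c
      · simp [h1, h2]
      · have hca : c = a := le_antisymm (not_lt.mp h2) (not_lt.mp h1)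
        simp [h1, h2]
        rw [← hca]
        exact ih (fun x hx => hub x (by simp [hx]))

-- the inner maximum of {G++[x], x::G} is exactly the greedy step
lemma mstep_rotation (G : List Char) (x : Char) (hG : HeadUB G) :
    mstep (G ++ [x]) (x :: G) = gstep G x := by
  cases G with
  | nil => simp [mstep, gstep, pyLtChars]
  | cons h t =>
    by_cases hx : x < h
    · have hfalse : pyLtChars ((h :: t) ++ [x]) (x :: h :: t) = false := by
        simp only [List.cons_append, pyLtChars]
        simp [hx, not_lt.mpr (le_of_lt hx)]
      rw [mstep, hfalse]
      simp [gstep, hx]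
    · have hub : ∀ a ∈ h :: t, a ≤ x :=
        fun a ha => le_trans (hG h rfl a ha) (not_lt.mp hx)
      have hno : pyLtChars (x :: (h :: t)) ((h :: t) ++ [x]) = false :=
        pyLt_rotate_false (h :: t) x hub
      by_cases hlt : pyLtChars ((h :: t) ++ [x]) (x :: h :: t) = true
      · rw [mstep, hlt]
        simp [gstep, hx]
      · have hlt' : pyLtChars ((h :: t) ++ [x]) (x :: h :: t) = false :=
          Bool.not_eq_true _ ▸ (eq_false_of_ne_true hlt)
        have heq : (h :: t) ++ [x] = x :: h :: t :=
          pyLt_asymm_eq _ _ (by simp) hlt' hno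
        rw [mstep, hlt', heq]
        simp [gstep, hx]

-- folding mstep commutes with appending a common last character over equal-length lists
lemma foldl_mstep_map_append (rest : List (List Char)) (c : List Char) (x : Char) (m : Nat)
    (hc : c.length = m) (hr : ∀ r ∈ rest, r.length = m) :
    List.foldl mstep (c ++ [x]) (rest.map (· ++ [x])) = (List.foldl mstep c rest) ++ [x] := by
  induction rest generalizing c with
  | nil => simp
  | cons r rs ih =>
    have hrlen : r.length = m := hr r (by simp)
    have hstep : mstep (c ++ [x]) (r ++ [x]) = mstep c r ++ [x] := by
      unfold mstep
      rw [pyLt_append_same c r x (by omega)]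
      split <;> rfl
    have hmlen : (mstep c r).length = m := by
      unfold mstep; split <;> simp [hc, hrlen]
    simp only [List.map_cons, List.foldl_cons, hstep]
    exact ih (mstep c r) hmlen (fun q hq => hr q (by simp [hq]))

lemma length_cand (L : List Char) (i j : Nat) (hj : j ≤ i) (hi : i < L.length) :
    (cand L i j).length = i + 1 := by
  simp [cand, length_g, List.length_take, List.length_drop]
  omega

lemma take_succ_getD (L : List Char) (n : Nat) (hn : n < L.length) :
    L.take (n + 1) = L.take n ++ [L.getD n ' '] := by
  rw [List.take_add_one]
  simp [List.getElem?_eq_getElem hn, List.getD_eq_getElem?_getD]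

lemma g_take_succ (L : List Char) (n : Nat) (hn : n < L.length) :
    g (L.take (n + 1)) = gstep (g (L.take n)) (L.getD n ' ') := by
  rw [take_succ_getD L n hn]; simp [g]

lemma cand_succ (L : List Char) (i j : Nat) (hj : j ≤ i) (hi : i + 1 < L.length) :
    cand L (i + 1) j = cand L i j ++ [L.getD (i + 1) ' '] := by
  unfold cand
  have h1 : i + 1 - j = (i - j) + 1 := by omega
  have h2 : i - j < (L.drop (j + 1)).length := by simp [List.length_drop]; omega
  rw [h1, List.take_add_one]
  have h3 : (L.drop (j + 1))[i - j]? = some (L.getD (i + 1) ' ') := by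
    rw [List.getElem?_drop]
    have : j + 1 + (i - j) = i + 1 := by omega
    rw [this, List.getElem?_eq_getElem hi, List.getD_eq_getElem?_getD,
        List.getElem?_eq_getElem hi]
    rfl
  rw [h3]
  simp

-- THE KEY LEMMA: A's inner maximum over all candidates is the greedy value of the prefix
lemma inner_max (L : List Char) (i : Nat) (hi : i < L.length) :
    List.foldl mstep (cand L i 0) ((List.range i).map (fun j => cand L i (j + 1)))
      = g (L.take (i + 1)) := by
  induction i with
  | zero =>
    simp [cand, g, take_succ_getD L 0 hi, gstep]
  | succ i ih =>
    have hi' : i < L.length := by omega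
    have hmap : (List.range (i + 1)).map (fun j => cand L (i + 1) (j + 1)) =
        ((List.range i).map (fun j => cand L i (j + 1))).map (· ++ [L.getD (i + 1) ' '])
        ++ [cand L (i + 1) (i + 1)] := by
      rw [List.range_succ, List.map_append, List.map_map]
      congr 1
      apply List.map_congr_left
      intro j hj
      simp at hj
      exact cand_succ L i (j + 1) (by omega) hi
    rw [hmap, cand_succ L i 0 (by omega) hi, List.foldl_append]
    rw [foldl_mstep_map_append _ _ _ (i + 1) (length_cand L i 0 (by omega) hi')
        (fun r hr => by
          simp at hr
          obtain ⟨j, hj, rfl⟩ := hr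
          exact length_cand L i (j + 1) (by omega) hi')]
    rw [ih hi']
    simp only [List.foldl_cons, List.foldl_nil]
    have hcand : cand L (i + 1) (i + 1) = L.getD (i + 1) ' ' :: g (L.take (i + 1)) := by
      unfold cand
      rw [Nat.sub_self, List.take_zero, List.append_nil]
    rw [hcand, mstep_rotation _ _ (headUB_g _)]
    exact (g_take_succ L (i + 1) hi).symm

-- ostep over a nonempty list is some of the mstep fold
lemma foldl_ostep_some (rest : List (List Char)) (c : List Char) :
    List.foldl ostep (some c) rest = some (List.foldl mstep c rest) := by
  induction rest generalizing c with
  | nil => rfl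
  | cons r rs ih =>
    simp only [List.foldl_cons]
    have : ostep (some c) r = some (mstep c r) := by
      simp only [ostep, mstep]
      split <;> rfl
    rw [this, ih]

-- A's inner loop, at outer index k, over W = greedy values of all shorter prefixes
lemma inner_port (L : List Char) (k : Nat) (hk : k < L.length) :
    (PySem.List.enumerate (PySem.List.slice L none (some ((k : Int) + 1)))).foldl
      (fun y jc => ostep y (candF L ((List.range (k + 1)).map (fun j => g (L.take j))) (k : Int) jc)) none
    = some (g (L.take (k + 1))) := by
  set W := (List.range (k + 1)).map (fun j => g (L.take j)) with hW
  have hcast : ((k : Int) + 1) = ((k + 1 : Nat) : Int) := by push_cast; ring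
  rw [hcast, PySem.List.slice_to_natCast]
  set xs := L.take (k + 1) with hxs
  have hlen : PySem.List.len xs = ((k + 1 : Nat) : Int) := by
    simp [PySem.List.len_eq, hxs, List.length_take]
    omega
  rw [PySem.List.enumerate_eq_map_pyRange xs ' ', hlen, PySem.List.pyRange_zero_natCast,
      List.foldl_map, List.foldl_map]
  have hcongr : ∀ (y : Option (List Char)), ∀ j ∈ List.range (k + 1),
      ostep y (candF L W (k : Int) ((j : Int), PySem.List.pyGetD xs (j : Int) ' '))
      = ostep y (cand L k j) := by
    intro y j hj
    simp only [List.mem_range] at hj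
    congr 1
    unfold candF cand
    simp only
    have e1 : PySem.List.pyGetD xs (j : Int) ' ' = L.getD j ' ' := by
      rw [PySem.List.pyGetD_natCast]
      have hjL : j < L.length := by omega
      simp [hxs, List.getD_eq_getElem?_getD, hj,
        List.getElem?_eq_getElem hjL]
    have e2 : PySem.List.pyGetD W (j : Int) [] = g (L.take j) := by
      rw [PySem.List.pyGetD_natCast, hW]
      have : j < ((List.range (k + 1)).map (fun j => g (L.take j))).length := by simp; omega
      rw [List.getD_eq_getElem _ _ this]
      simp
    have e3 : PySem.List.slice L (some ((j : Int) + 1)) (some ((k : Int) + 1))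
        = (L.drop (j + 1)).take (k - j) := by
      have c1 : ((j : Int) + 1) = ((j + 1 : Nat) : Int) := by push_cast; ring
      rw [c1, hcast, PySem.List.slice_natCast]
      congr 1
      omega
    rw [e1, e2, e3]
  rw [PySem.List.foldl_congr_mem _ _ _ _ hcongr, ← List.foldl_map (f := cand L k)]
  have hsplit : (List.range (k + 1)).map (cand L k)
      = cand L k 0 :: (List.range k).map (fun j => cand L k (j + 1)) := by
    rw [List.range_succ_eq_map, List.map_cons, List.map_map]
    rfl
  rw [hsplit]
  simp only [List.foldl_cons]
  have : ostep none (cand L k 0) = some (cand L k 0) := rfl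
  rw [this, foldl_ostep_some]
  rw [inner_max L k hk]

-- A's outer loop invariant
lemma outer_inv (L : List Char) (k : Nat) (hk : k ≤ L.length) :
    (PySem.List.pyRange 0 (k : Int)).foldl (outerStep L) [([] : List Char)]
      = (List.range (k + 1)).map (fun j => g (L.take j)) := by
  induction k with
  | zero => simp [PySem.List.pyRange, g]
  | succ k ih =>
    have hk' : k ≤ L.length := by omega
    have hsplit : PySem.List.pyRange 0 ((k + 1 : Nat) : Int)
        = PySem.List.pyRange 0 (k : Int) ++ [(k : Int)] := by
      rw [PySem.List.pyRange_one_append 0 (k : Int) ((k + 1 : Nat) : Int)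
        (by positivity) (by push_cast; omega)]
      congr 1
      rw [PySem.List.pyRange_one_cons (by push_cast; omega)]
      have : (k : Int) + 1 = ((k + 1 : Nat) : Int) := by push_cast; ring
      rw [this]
      simp [PySem.List.pyRange]
  
    rw [hsplit, List.foldl_append, ih hk']
    simp only [List.foldl_cons, List.foldl_nil]
    unfold outerStep
    rw [inner_port L k (by omega)]
    rw [List.range_succ (n := k + 1), List.map_append]
    rfl

lemma solve_eq_g (S : String) : solve S = String.mk (g S.toList) := by
  unfold solve
  simp only [PySem.List.len_eq]
  have hfun : (fun (W : List (List Char)) (i : Int) =>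
      W ++ [((PySem.List.enumerate (PySem.List.slice S.toList none (some (i + 1)))).foldl
        (fun y jc =>
          let w := jc.2 :: (PySem.List.pyGetD W jc.1 [] ++ PySem.List.slice S.toList (some (jc.1 + 1)) (some (i + 1)))
          match y with
          | none => some w
          | some yv => if pyLtChars yv w then some w else some yv) none).getD []])
      = outerStep S.toList := by
    funext W i
    rfl
  rw [hfun, outer_inv S.toList S.toList.length (le_refl _)]
  rw [PySem.List.pyGetD_neg_ofNat _ 1 [] (by omega) (by simp [PySem.List.len_eq])]
  simp only [List.length_map, List.length_range, Nat.add_sub_cancel]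
  rw [List.getElem_map, List.getElem_range, List.take_length]

-- B's loop invariant: the flattened (front, back) state evolves by gstep
lemma b_inv (L : List Char) : ∀ (f b : List Char), (f = [] → b = []) →
    (let r := L.foldl (fun fb c =>
        match fb.1.getLast? with
        | some h => if c < h then (fb.1, fb.2 ++ [c]) else (fb.1 ++ [c], fb.2)
        | none => (fb.1 ++ [c], fb.2)) (f, b)
     r.1.reverse ++ r.2) = List.foldl gstep (f.reverse ++ b) L := by
  induction L with
  | nil => intro f b _; rfl
  | cons c L ih =>
    intro f b hfb
    rcases hf : f.getLast? with _ | h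
    · have hfnil : f = [] := List.getLast?_eq_none_iff.mp hf
      have hbnil : b = [] := hfb hfnil
      subst hfnil; subst hbnil
      simp only [List.foldl_cons]
      have : gstep ((List.nil (α := Char)).reverse ++ []) c = [c] := rfl
      rw [this]
      have := ih [c] [] (by simp)
      simpa using this
    · obtain ⟨f', rfl⟩ := List.getLast?_eq_some_iff.mp hf
      have hflat : (f' ++ [h]).reverse ++ b = h :: (f'.reverse ++ b) := by simp
      by_cases hc : c < h
      · simp only [List.foldl_cons, hf, hc, if_pos]
        have hg : gstep ((f' ++ [h]).reverse ++ b) c = (f' ++ [h]).reverse ++ (b ++ [c]) := by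
          rw [hflat]; simp [gstep, hc]
        rw [hg]
        exact ih (f' ++ [h]) (b ++ [c]) (by simp)
      · simp only [List.foldl_cons, hf, hc, if_neg, not_false_iff]
        have hg : gstep ((f' ++ [h]).reverse ++ b) c = ((f' ++ [h]) ++ [c]).reverse ++ b := by
          rw [hflat]; simp [gstep, hc]
        rw [hg]
        exact ih ((f' ++ [h]) ++ [c]) b (by simp)

lemma solve_alt_eq_g (S : String) : solve_alt S = String.mk (g S.toList) := by
  unfold solve_alt
  have := b_inv S.toList [] [] (fun _ => rfl)
  simp only at this
  rw [show (([] : List Char).reverse ++ ([] : List Char)) = [] from rfl] at this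
  simp only [g]
  exact congrArg String.mk this

-- ===== VERDICT (by name: the statement is the Claim_ definition above) =====
theorem solve_spec : Claim_equal_solve := by
  intro S _
  unfold Spec_solve
  rw [solve_eq_g, solve_alt_eq_g]
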